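-- pv_equiv track=rewrite | github.com/morozowdmitry/mental_neighbours | morpheme_evaluation/pseudocognate.py | cut_possible_prefixes
-- ===== SOURCE A (Python) =====
-- def cut_possible_prefixes(word, prefixes):
--     pseudoroots = {word}
--
--     can_cut = True
--     while can_cut:
--         new_pseudoroots = set()
--         for prefix in prefixes:
--             for option in pseudoroots:
--                 pseudoroot = option.split('/')[-1]
--                 existing_prefixes = option.split('/')[:-1]
--                 if pseudoroot.startswith(prefix) and prefix not in existing_prefixes:
--                     new_pseudoroots.add('/'.join(existing_prefixes + [prefix] + [pseudoroot[len(prefix):]]))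
--         if new_pseudoroots.issubset(pseudoroots):
--             can_cut = False
--         pseudoroots.update(new_pseudoroots)
--     pseudoroots = {x.split('/')[-1] for x in pseudoroots}
--     return pseudoroots
-- ===== SOURCE B (Python) =====
-- def cut_possible_prefixes(word, prefixes):
--     segs = word.split('/')
--     root0 = segs[-1]
--     used0 = segs[:-1]
--     avail0 = [p for p in dict.fromkeys(prefixes) if p not in used0]
--
--     def go(root, avail):
--         res = {root}
--         for p in avail:
--             if root.startswith(p):
--                 rest = list(avail)
--                 rest.remove(p)
--                 res |= go(root[len(p):], rest)
--         return res
--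
--     return go(root0, avail0)
-- ===== Notes on version B (the rewrite author's own statement) =====
-- stated objective: alternative
-- what changed: A iterates a global fixpoint: each round it rescans the whole accumulated set of '/'-encoded history strings, re-splitting and re-joining every entry for every prefix until a round adds nothing; B recurses directly on the state (remaining root, still-available prefixes), visiting each stripping path once with plain slicing and no string re-encoding or rescanning (it trades A's repeated set rescans for one traversal of the path tree; both still enumerate all orderings in the worst case).
import Mathlib
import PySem

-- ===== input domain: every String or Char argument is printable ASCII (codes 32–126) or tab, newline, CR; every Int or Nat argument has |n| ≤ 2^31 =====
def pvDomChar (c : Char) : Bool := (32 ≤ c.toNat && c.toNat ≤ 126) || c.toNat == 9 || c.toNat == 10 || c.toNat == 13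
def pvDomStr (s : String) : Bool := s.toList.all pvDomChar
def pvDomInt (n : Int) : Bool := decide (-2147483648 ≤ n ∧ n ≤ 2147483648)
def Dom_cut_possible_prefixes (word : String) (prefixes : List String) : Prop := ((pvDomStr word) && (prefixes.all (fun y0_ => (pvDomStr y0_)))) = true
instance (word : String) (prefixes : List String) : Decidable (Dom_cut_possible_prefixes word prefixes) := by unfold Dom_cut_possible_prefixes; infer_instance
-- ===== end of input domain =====

-- B replaces A's global fixpoint iteration over '/'-encoded history strings by a direct
-- recursion on (remaining root, unused prefixes), visiting each stripping path once and
-- doing no string re-encoding or set rescanning (a different algorithm of the same worst-case cost).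
-- Both Pythons return an unordered set; both ports return it as the canonically sorted list
-- (the behavioural comparison for set results ignores order).


-- ===== PORT A =====
-- shared helpers for the small Python idioms both sources use verbatim:
-- s.split('/') (the separator "/" is nonempty, so split? is always some)
def pvSplit (s : String) : List String := (PySem.Str.split? s "/").getD []
-- l[-1]; both Pythons only apply it to split results, which are never empty
def pvLast (l : List String) : String := (PySem.List.pyGet? l (-1)).getD ""
-- root[len(p):]
def pvCut (root p : String) : String := PySem.Str.slice root (some (PySem.Str.len p)) none

-- one pass of A's while-body: build new_pseudoroots from the current set
def pvRound (prefixes : List String) (pseudoroots : PySem.Set String) : PySem.Set String :=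
  prefixes.foldl (fun np pfx =>
    pseudoroots.foldl (fun np opt =>
      let root := pvLast (pvSplit opt)
      let ex := PySem.List.slice (pvSplit opt) none (some (-1))
      if PySem.Str.startswith root pfx && !(decide (pfx ∈ ex)) then
        PySem.Set.add np (PySem.Str.join "/" (ex ++ [pfx] ++ [pvCut root pfx]))
      else np) np) PySem.Set.empty

-- A's while-loop. The fuel only makes the recursion total: the loop provably stabilises
-- after at most prefixes.length + 1 iterations (each step consumes a fresh unused prefix),
-- so fuel prefixes.length + 2 is never exhausted (this is proved, see pv_loop_main below).
def pvLoopA (prefixes : List String) : Nat → PySem.Set String → PySem.Set String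
  | 0, ps => ps
  | fuel+1, ps =>
    let np := pvRound prefixes ps
    if PySem.Set.issubset np ps then PySem.Set.update ps np
    else pvLoopA prefixes fuel (PySem.Set.update ps np)

def cut_possible_prefixes (word : String) (prefixes : List String) : List String :=
  let final := pvLoopA prefixes (prefixes.length + 2) (PySem.Set.ofList [word])
  PySem.List.sorted (PySem.Set.ofList (final.map (fun x => pvLast (pvSplit x)))) (fun x => x) false

-- ===== PORT B =====
-- B: go(root, avail) = {root} ∪ ⋃ { go(root[len p:], avail minus p) | p ∈ avail matching }.
mutual
def pvGo (root : String) (avail : List String) : PySem.Set String :=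
  pvGoLoop root avail avail.attach (PySem.Set.ofList [root])
termination_by (avail.length, avail.length + 1)

def pvGoLoop (root : String) (avail : List String)
    (todo : List {p : String // p ∈ avail}) (res : PySem.Set String) : PySem.Set String :=
  match todo with
  | [] => res
  | p :: rest =>
    let res' := if PySem.Str.startswith root p.1 then
        PySem.Set.update res (pvGo (pvCut root p.1) (avail.erase p.1))
      else res
    pvGoLoop root avail rest res'
termination_by (avail.length, todo.length)
decreasing_by
  all_goals first
    | (apply Prod.Lex.left
       · have h1 := List.length_erase_of_mem p.2
         have h2 := List.length_pos_of_mem p.2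
         omega)
    | (apply Prod.Lex.right; simp)
end

def cut_possible_prefixes_alt (word : String) (prefixes : List String) : List String :=
  let segs := pvSplit word
  let root0 := pvLast segs
  let used0 := PySem.List.slice segs none (some (-1))
  let avail0 := (PySem.List.dedup prefixes).filter (fun p => decide (p ∉ used0))
  PySem.List.sorted (pvGo root0 avail0) (fun x => x) false

-- ===== PRECONDITION & SPEC =====
def Spec_cut_possible_prefixes (word : String) (prefixes : List String) (out : List String) : Prop := out = cut_possible_prefixes_alt word prefixes
instance (word : String) (prefixes : List String) (out : List String) : Decidable (Spec_cut_possible_prefixes word prefixes out) := by unfold Spec_cut_possible_prefixes; infer_instance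

-- ===== CLAIM (what is proved, stated in full; the proofs are below) =====
def Claim_equal_cut_possible_prefixes : Prop := ∀ (word : String) (prefixes : List String), Dom_cut_possible_prefixes word prefixes → Spec_cut_possible_prefixes word prefixes (cut_possible_prefixes word prefixes)

-- ===== LEMMAS AND PROOFS =====

-- ---------- splitting on '/': an induction-friendly model of Python's str.split ----------
def pvMsp (c : Char) (pre : List Char) : List Char → List (List Char)
  | [] => [pre]
  | x :: rest => if x = c then pre :: pvMsp c [] rest else pvMsp c (pre ++ [x]) rest

def pvSlashFree (s : String) : Prop := '/' ∉ s.toList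

-- the '/'-joined encoding A keeps in its pseudoroots set
def pvEnc (used : List String) (root : String) : String := PySem.Str.join "/" (used ++ [root])

-- reachability of a state (used prefixes, remaining root) by repeated stripping:
-- front-step formulation (matches B's recursion)
inductive pvReach (P : List String) : List String → String → List String → String → Prop
  | refl (u : List String) (r : String) : pvReach P u r u r
  | step {u : List String} {root : String} {u' : List String} {r' : String} (p : String)
      (hp : p ∈ P) (hn : p ∉ u) (hs : PySem.Str.startswith root p = true)
      (h : pvReach P (u ++ [p]) (pvCut root p) u' r') : pvReach P u root u' r'

-- back-step (snoc) formulation with a step budget (matches A's round iteration)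
inductive pvReachN (P : List String) : Nat → List String → String → List String → String → Prop
  | refl (n : Nat) (u : List String) (r : String) : pvReachN P n u r u r
  | snoc {n : Nat} {u : List String} {r : String} {u' : List String} {root' : String} (p : String)
      (h : pvReachN P n u r u' root') (hp : p ∈ P) (hn : p ∉ u')
      (hs : PySem.Str.startswith root' p = true) :
      pvReachN P (n+1) u r (u' ++ [p]) (pvCut root' p)

def pvGood (P : List String) (u0 : List String) (r0 : String) (x : String) : Prop :=
  ∃ u r, pvReach P u0 r0 u r ∧ x = pvEnc u r

-- B's own state space: remaining root plus the still-available prefixes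
inductive pvRA : String → List String → String → Prop
  | refl (root : String) (avail : List String) : pvRA root avail root
  | step {root : String} {avail : List String} {r : String} (p : String) (hp : p ∈ avail)
      (hs : PySem.Str.startswith root p = true)
      (h : pvRA (pvCut root p) (avail.erase p) r) : pvRA root avail r

theorem pvMsp_go (c : Char) : ∀ (fuel : Nat) (l cur : List Char) (acc : List (List Char)),
    l.length < fuel →
    PySem.Chars.splitOn.go [c] fuel l cur acc = acc.reverse ++ pvMsp c cur.reverse l := by
  intro fuel
  induction fuel with
  | zero => intro l cur acc h; omega
  | succ n ih =>
    intro l cur acc h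
    cases l with
    | nil => simp [PySem.Chars.splitOn.go, pvMsp]
    | cons x rest =>
      rw [PySem.Chars.splitOn.go]
      by_cases hx : x = c
      · subst hx
        simp only [List.isPrefixOf, List.length_cons] at *
        rw [if_pos (by simp)]
        rw [ih _ _ _ (by simpa using h)]
        simp [pvMsp]
      · rw [if_neg (by simp [List.isPrefixOf]; exact fun hc => absurd hc.symm hx)]
        rw [ih _ _ _ (by simp at h ⊢; omega)]
        simp [pvMsp, hx]

theorem pv_splitOn_eq_msp (c : Char) (l : List Char) :
    PySem.Chars.splitOn l [c] = pvMsp c [] l := by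
  rw [PySem.Chars.splitOn, pvMsp_go c (l.length+1) l [] [] (by omega)]
  simp

theorem pvMsp_ne_nil (c : Char) (pre l : List Char) : pvMsp c pre l ≠ [] := by
  induction l generalizing pre with
  | nil => simp [pvMsp]
  | cons x rest ih =>
    by_cases hx : x = c
    · simp [pvMsp, hx]
    · simpa [pvMsp, hx] using ih _

theorem pvMsp_join (c : Char) (pre l : List Char) :
    PySem.Chars.join [c] (pvMsp c pre l) = pre ++ l := by
  induction l generalizing pre with
  | nil => simp [pvMsp, PySem.Chars.join_singleton]
  | cons x rest ih =>
    by_cases hx : x = c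
    · rw [pvMsp, if_pos hx, hx]
      obtain ⟨h, t, hht⟩ : ∃ h t, pvMsp c [] rest = h :: t := by
        cases hm : pvMsp c [] rest with
        | nil => exact absurd hm (pvMsp_ne_nil c [] rest)
        | cons h t => exact ⟨h, t, rfl⟩
      rw [hht, PySem.Chars.join_cons_cons, ← hht, ih]
      simp
    · rw [pvMsp, if_neg hx, ih]
      simp

theorem pvMsp_not_mem (c : Char) (pre l : List Char) (h : c ∉ pre) :
    ∀ piece ∈ pvMsp c pre l, c ∉ piece := by
  induction l generalizing pre with
  | nil => simpa [pvMsp] using h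
  | cons x rest ih =>
    by_cases hx : x = c
    · rw [pvMsp, if_pos hx]
      intro piece hp
      rcases List.mem_cons.mp hp with h1 | h1
      · subst h1; exact h
      · exact ih [] (by simp) piece h1
    · rw [pvMsp, if_neg hx]
      exact ih (pre ++ [x]) (by simp [h]; exact fun e => hx e.symm)

theorem pvMsp_append_no_c (c : Char) : ∀ (a : List Char), c ∉ a →
    ∀ (pre l : List Char), pvMsp c pre (a ++ l) = pvMsp c (pre ++ a) l := by
  intro a
  induction a with
  | nil => simp
  | cons x xs ih =>
    intro h pre l
    have hx : ¬ x = c := by simp at h; exact fun e => h.1 e.symm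
    rw [List.cons_append, pvMsp, if_neg hx, ih (by simp at h; exact h.2)]
    simp

theorem pvMsp_decode (c : Char) (parts : List (List Char)) (lst : List Char)
    (hp : ∀ p ∈ parts, c ∉ p) (hl : c ∉ lst) :
    pvMsp c [] (PySem.Chars.join [c] (parts ++ [lst])) = parts ++ [lst] := by
  induction parts with
  | nil =>
    rw [List.nil_append, PySem.Chars.join_singleton]
    have h2 := pvMsp_append_no_c c lst hl [] []
    simpa [pvMsp] using h2
  | cons a ps ih =>
    obtain ⟨q, rest, he⟩ : ∃ q rest, ps ++ [lst] = q :: rest := by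
      cases ps <;> simp
    rw [List.cons_append, he, PySem.Chars.join_cons_cons, ← he]
    have ha : c ∉ a := hp a (by simp)
    rw [List.append_assoc, pvMsp_append_no_c c a ha [] _, List.nil_append]
    have : pvMsp c a ([c] ++ PySem.Chars.join [c] (ps ++ [lst])) =
        a :: pvMsp c [] (PySem.Chars.join [c] (ps ++ [lst])) := by
      rw [List.singleton_append, pvMsp, if_pos rfl]
    rw [this, ih (fun p hp' => hp p (by simp [hp']))]

theorem pvSplit_toList (s : String) :
    (pvSplit s).map String.toList = pvMsp '/' [] s.toList := by
  have h := PySem.Str.split?_map s "/"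
  cases hs : PySem.Str.split? s "/" with
  | none => rw [hs] at h; simp [PySem.Chars.split?] at h
  | some l =>
    rw [hs] at h
    simp only [Option.map_some] at h
    rw [PySem.Chars.split?] at h
    rw [if_neg (by decide)] at h
    have : String.toList "/" = ['/'] := by decide
    rw [this] at h
    rw [pvSplit, hs, Option.getD_some]
    rw [Option.some_inj] at h
    rw [h, pv_splitOn_eq_msp]

theorem pvSplit_ne_nil (s : String) : pvSplit s ≠ [] := by
  intro h
  have := pvSplit_toList s
  rw [h] at this
  exact pvMsp_ne_nil '/' [] s.toList this.symm

theorem pvSplit_slashFree (s : String) : ∀ p ∈ pvSplit s, pvSlashFree p := by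
  intro p hp
  have h := pvSplit_toList s
  have : p.toList ∈ pvMsp '/' [] s.toList := by
    rw [← h]; exact List.mem_map_of_mem hp
  exact pvMsp_not_mem '/' [] s.toList (by simp) p.toList this

theorem pv_join_split (s : String) : PySem.Str.join "/" (pvSplit s) = s := by
  apply String.toList_injective
  rw [PySem.Str.toList_join, pvSplit_toList]
  have : String.toList "/" = ['/'] := by decide
  rw [this, pvMsp_join]
  simp

theorem pv_split_enc (used : List String) (root : String)
    (hu : ∀ u ∈ used, pvSlashFree u) (hr : pvSlashFree root) :
    pvSplit (pvEnc used root) = used ++ [root] := by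
  have key : (pvSplit (pvEnc used root)).map String.toList = (used ++ [root]).map String.toList := by
    rw [pvSplit_toList]
    rw [pvEnc, PySem.Str.toList_join]
    have : String.toList "/" = ['/'] := by decide
    rw [this, List.map_append, List.map_singleton]
    rw [pvMsp_decode '/' (used.map String.toList) root.toList
      (by intro p hp; obtain ⟨u, hu', rfl⟩ := List.mem_map.mp hp; exact hu u hu') hr]
  have hinj : Function.Injective String.toList := fun a b h => String.toList_injective h
  exact List.map_injective_iff.mpr hinj key

theorem pvLast_append (u : List String) (r : String) : pvLast (u ++ [r]) = r := by
  rw [pvLast, PySem.List.pyGet?, PySem.List.pyIdx?]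
  rw [if_neg (by omega), if_pos (by simp)]
  simp

theorem pv_slice_neg_one {α : Type} (l : List α) :
    PySem.List.slice l none (some (-1)) = l.dropLast := by
  rw [PySem.List.slice, PySem.List.clampIdx, List.dropLast_eq_take]
  split_ifs with h1 h2
  · simp at h2
    simp [List.take_of_length_le, h2]
  · have : ((l.length : Int) + -1).toNat = l.length - 1 := by omega
    simp [this]
  · omega

theorem pvCut_toList (root p : String) :
    (pvCut root p).toList = root.toList.drop p.toList.length := by
  rw [pvCut, PySem.Str.toList_slice, PySem.Chars.slice_eq_listSlice]
  rw [PySem.Str.len_eq]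
  rw [PySem.List.slice_from _ (by positivity)]
  simp

theorem pvReachN_succ {P : List String} {n : Nat} {u : List String} {r : String}
    {u' : List String} {r' : String} (h : pvReachN P n u r u' r') :
    pvReachN P (n+1) u r u' r' := by
  induction h with
  | refl => exact pvReachN.refl _ _ _
  | snoc p h hp hn hs ih => exact pvReachN.snoc p ih hp hn hs

theorem pvReachN_mono {P : List String} {n : Nat} {u : List String} {r : String}
    {u' : List String} {r' : String} (h : pvReachN P n u r u' r') :
    ∀ m, n ≤ m → pvReachN P m u r u' r' := by
  intro m hm
  induction m with
  | zero => exact Nat.le_zero.mp hm ▸ h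
  | succ k ih =>
    rcases Nat.lt_or_ge n (k+1) with hlt | hge
    · exact pvReachN_succ (ih (by omega))
    · have : n = k + 1 := by omega
      exact this ▸ h

theorem pvReachN_front_aux {P : List String} {n : Nat} {a : List String} {b : String}
    {u' : List String} {r' : String} (h : pvReachN P n a b u' r') :
    ∀ (u : List String) (root p : String), a = u ++ [p] → b = pvCut root p →
      p ∈ P → p ∉ u → PySem.Str.startswith root p = true → pvReachN P (n+1) u root u' r' := by
  induction h with
  | refl n c d =>
    intro u root p ha hb hp hn hs
    subst ha; subst hb
    exact pvReachN.snoc p (pvReachN.refl n u root) hp hn hs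
  | snoc q h hq hnq hsq ih =>
    intro u root p ha hb hp hn hs
    exact pvReachN.snoc q (ih u root p ha hb hp hn hs) hq hnq hsq

theorem pvReachN_front {P : List String} {n : Nat} {u : List String} {root : String}
    {u' : List String} {r' : String} (p : String)
    (h : pvReachN P n (u ++ [p]) (pvCut root p) u' r')
    (hp : p ∈ P) (hn : p ∉ u) (hs : PySem.Str.startswith root p = true) :
    pvReachN P (n+1) u root u' r' :=
  pvReachN_front_aux h u root p rfl rfl hp hn hs

theorem pvReach_snoc {P : List String} {u : List String} {r : String}
    {u' : List String} {root' : String} (h : pvReach P u r u' root') (q : String)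
    (hq : q ∈ P) (hnq : q ∉ u') (hsq : PySem.Str.startswith root' q = true) :
    pvReach P u r (u' ++ [q]) (pvCut root' q) := by
  induction h with
  | refl u2 r2 => exact pvReach.step q hq hnq hsq (pvReach.refl _ _)
  | step p2 hp2 hn2 hs2 h2 ih2 => exact pvReach.step p2 hp2 hn2 hs2 (ih2 hnq hsq)

theorem pvReachN_toReach {P : List String} {n : Nat} {u : List String} {r : String}
    {u' : List String} {r' : String} (h : pvReachN P n u r u' r') : pvReach P u r u' r' := by
  induction h with
  | refl => exact pvReach.refl _ _
  | snoc q h hq hnq hsq ih => exact pvReach_snoc ih q hq hnq hsq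

theorem pvReach_bound {P : List String} {u : List String} {r : String}
    {u' : List String} {r' : String} (h : pvReach P u r u' r') :
    ∃ ext, u' = u ++ ext ∧ ext.Nodup ∧ (∀ x ∈ ext, x ∈ P ∧ x ∉ u) ∧
      pvReachN P ext.length u r u' r' := by
  induction h with
  | refl u r => exact ⟨[], by simp, List.nodup_nil, by simp, pvReachN.refl 0 u r⟩
  | step p hp hn hs h ih =>
    obtain ⟨ext, he, hnd, hmem, hN⟩ := ih
    refine ⟨p :: ext, by simp [he], ?_, ?_, ?_⟩
    · refine List.nodup_cons.mpr ⟨?_, hnd⟩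
      intro hpe
      exact (hmem p hpe).2 (by simp)
    · intro x hx
      rcases List.mem_cons.mp hx with rfl | hx
      · exact ⟨hp, hn⟩
      · have := hmem x hx
        exact ⟨this.1, fun hxu => this.2 (by simp [hxu])⟩
    · simpa using pvReachN_front p hN hp hn hs

theorem pvReach_toN {P : List String} {u : List String} {r : String}
    {u' : List String} {r' : String} (h : pvReach P u r u' r') :
    pvReachN P P.length u r u' r' := by
  obtain ⟨ext, he, hnd, hmem, hN⟩ := pvReach_bound h
  have hsub : ext ⊆ P := fun x hx => (hmem x hx).1
  have hlen : ext.length ≤ P.length := (hnd.subperm hsub).length_le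
  exact pvReachN_mono hN P.length hlen

theorem pvReach_slashFree {P : List String} {u : List String} {r : String}
    {u' : List String} {r' : String} (h : pvReach P u r u' r')
    (hu : ∀ x ∈ u, pvSlashFree x) (hr : pvSlashFree r) :
    (∀ x ∈ u', pvSlashFree x) ∧ pvSlashFree r' := by
  induction h with
  | refl => exact ⟨hu, hr⟩
  | step p hp hn hs h ih =>
    rename_i uu root uu' rr'
    have hpfx : p.toList <+: root.toList := by
      rw [PySem.Str.startswith_eq] at hs
      exact (PySem.Chars.startswith_iff _ _).mp hs
    have hpf : pvSlashFree p := fun hc => hr (hpfx.subset hc)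
    have hcf : pvSlashFree (pvCut root p) := by
      intro hc
      rw [pvCut_toList] at hc
      exact hr (List.mem_of_mem_drop hc)
    refine ih ?_ hcf
    intro x hx
    rcases List.mem_append.mp hx with hx | hx
    · exact hu x hx
    · simpa using (by simp at hx; exact hx ▸ hpf)

theorem pv_mem_foldl_addif {β : Type} (l : List β) (c : β → Bool) (f : β → String)
    (s0 : PySem.Set String) (y : String) :
    y ∈ l.foldl (fun s x => if c x then PySem.Set.add s (f x) else s) s0 ↔
      y ∈ s0 ∨ ∃ x ∈ l, c x = true ∧ y = f x := by
  induction l generalizing s0 with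
  | nil => simp
  | cons x xs ih =>
    rw [List.foldl_cons, ih]
    by_cases hc : c x = true
    · rw [if_pos hc]
      rw [PySem.Set.mem_add]
      constructor
      · rintro (⟨h | h⟩ | h)
        · exact Or.inl h
        · exact Or.inr ⟨x, by simp, hc, h⟩
        · exact Or.inr (by obtain ⟨z, hz, h1, h2⟩ := h; exact ⟨z, by simp [hz], h1, h2⟩)
      · rintro (h | ⟨z, hz, h1, h2⟩)
        · exact Or.inl (Or.inl h)
        · rcases List.mem_cons.mp hz with rfl | hz
          · exact Or.inl (Or.inr h2)
          · exact Or.inr ⟨z, hz, h1, h2⟩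
    · rw [if_neg hc]
      constructor
      · rintro (h | ⟨z, hz, h1, h2⟩)
        · exact Or.inl h
        · exact Or.inr ⟨z, by simp [hz], h1, h2⟩
      · rintro (h | ⟨z, hz, h1, h2⟩)
        · exact Or.inl h
        · rcases List.mem_cons.mp hz with rfl | hz
          · exact absurd h1 hc
          · exact Or.inr ⟨z, hz, h1, h2⟩

theorem pv_mem_foldl_acc {β : Type} (l : List β) (g : PySem.Set String → β → PySem.Set String)
    (Q : β → String → Prop) (hg : ∀ s x y, y ∈ g s x ↔ y ∈ s ∨ Q x y)
    (s0 : PySem.Set String) (y : String) :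
    y ∈ l.foldl g s0 ↔ y ∈ s0 ∨ ∃ x ∈ l, Q x y := by
  induction l generalizing s0 with
  | nil => simp
  | cons x xs ih =>
    rw [List.foldl_cons, ih]
    rw [hg]
    constructor
    · rintro ((h | h) | ⟨z, hz, hq⟩)
      · exact Or.inl h
      · exact Or.inr ⟨x, by simp, h⟩
      · exact Or.inr ⟨z, by simp [hz], hq⟩
    · rintro (h | ⟨z, hz, hq⟩)
      · exact Or.inl (Or.inl h)
      · rcases List.mem_cons.mp hz with rfl | hz
        · exact Or.inl (Or.inr hq)
        · exact Or.inr ⟨z, hz, hq⟩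

theorem pvRound_mem (P : List String) (ps : PySem.Set String) (y : String) :
    y ∈ pvRound P ps ↔ ∃ pfx ∈ P, ∃ opt ∈ ps,
      (PySem.Str.startswith (pvLast (pvSplit opt)) pfx = true ∧
        pfx ∉ PySem.List.slice (pvSplit opt) none (some (-1))) ∧
      y = PySem.Str.join "/"
        (PySem.List.slice (pvSplit opt) none (some (-1)) ++ [pfx] ++
          [pvCut (pvLast (pvSplit opt)) pfx]) := by
  rw [pvRound]
  rw [pv_mem_foldl_acc _ _
    (fun pfx y => ∃ opt ∈ ps,
      (PySem.Str.startswith (pvLast (pvSplit opt)) pfx = true ∧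
        pfx ∉ PySem.List.slice (pvSplit opt) none (some (-1))) ∧
      y = PySem.Str.join "/"
        (PySem.List.slice (pvSplit opt) none (some (-1)) ++ [pfx] ++
          [pvCut (pvLast (pvSplit opt)) pfx]))
    ?_ PySem.Set.empty y]
  · constructor
    · rintro (h | h)
      · simp [PySem.Set.empty] at h
      · exact h
    · exact Or.inr
  · intro s pfx z
    rw [pv_mem_foldl_addif ps
      (fun opt => PySem.Str.startswith (pvLast (pvSplit opt)) pfx &&
        !(decide (pfx ∈ PySem.List.slice (pvSplit opt) none (some (-1)))))
      (fun opt => PySem.Str.join "/"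
        (PySem.List.slice (pvSplit opt) none (some (-1)) ++ [pfx] ++
          [pvCut (pvLast (pvSplit opt)) pfx])) s z]
    constructor
    · rintro (h | ⟨opt, ho, h1, h2⟩)
      · exact Or.inl h
      · refine Or.inr ⟨opt, ho, ?_, h2⟩
        simpa using h1
    · rintro (h | ⟨opt, ho, h1, h2⟩)
      · exact Or.inl h
      · exact Or.inr ⟨opt, ho, by simpa using h1, h2⟩

theorem pvRound_mem_enc (P : List String) (ps : PySem.Set String) (u : List String)
    (root : String) (hu : ∀ x ∈ u, pvSlashFree x) (hr : pvSlashFree root)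
    (hmem : pvEnc u root ∈ ps) (p : String) (hp : p ∈ P) (hn : p ∉ u)
    (hs : PySem.Str.startswith root p = true) :
    pvEnc (u ++ [p]) (pvCut root p) ∈ pvRound P ps := by
  rw [pvRound_mem]
  refine ⟨p, hp, pvEnc u root, hmem, ?_, ?_⟩
  · rw [pv_split_enc u root hu hr, pvLast_append, pv_slice_neg_one, List.dropLast_concat]
    exact ⟨hs, hn⟩
  · rw [pv_split_enc u root hu hr, pvLast_append, pv_slice_neg_one, List.dropLast_concat]
    rw [pvEnc, List.append_assoc]

theorem pv_step_slashFree {P : List String} {u : List String} {root p : String}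
    (hu : ∀ x ∈ u, pvSlashFree x) (hr : pvSlashFree root) (hp : p ∈ P) (hn : p ∉ u)
    (hs : PySem.Str.startswith root p = true) :
    (∀ x ∈ u ++ [p], pvSlashFree x) ∧ pvSlashFree (pvCut root p) :=
  pvReach_slashFree (pvReach.step p hp hn hs (pvReach.refl _ _)) hu hr

theorem pv_round_sound (P : List String) (u0 : List String) (r0 : String)
    (hu0 : ∀ x ∈ u0, pvSlashFree x) (hr0 : pvSlashFree r0) (ps : PySem.Set String)
    (hInv : ∀ x ∈ ps, pvGood P u0 r0 x) :
    ∀ y ∈ pvRound P ps, pvGood P u0 r0 y := by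
  intro y hy
  rw [pvRound_mem] at hy
  obtain ⟨pfx, hpfx, opt, hopt, ⟨hsw, hnm⟩, rfl⟩ := hy
  obtain ⟨u, r, hre, rfl⟩ := hInv opt hopt
  obtain ⟨hus, hrs⟩ := pvReach_slashFree hre hu0 hr0
  rw [pv_split_enc u r hus hrs] at hsw hnm ⊢
  rw [pvLast_append] at hsw ⊢
  rw [pv_slice_neg_one, List.dropLast_concat] at hnm ⊢
  exact ⟨u ++ [pfx], pvCut r pfx, pvReach_snoc hre pfx hpfx hnm hsw,
    by rw [pvEnc, List.append_assoc]⟩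

theorem pv_closed (P : List String) (ps : PySem.Set String)
    (hcl : ∀ y ∈ pvRound P ps, y ∈ ps) :
    ∀ {u r u' r'}, pvReach P u r u' r' → pvEnc u r ∈ ps →
      (∀ x ∈ u, pvSlashFree x) → pvSlashFree r → pvEnc u' r' ∈ ps := by
  intro u r u' r' h
  induction h with
  | refl => exact fun h _ _ => h
  | step p hp hn hs h ih =>
    intro hmem hu hr
    have hstep := pvRound_mem_enc P ps _ _ hu hr hmem p hp hn hs
    have hsf := pv_step_slashFree hu hr hp hn hs
    exact ih (hcl _ hstep) hsf.1 hsf.2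

theorem pv_loop_main (P : List String) (u0 : List String) (r0 : String)
    (hu0 : ∀ x ∈ u0, pvSlashFree x) (hr0 : pvSlashFree r0) :
    ∀ (fuel k : Nat) (ps : PySem.Set String),
      (∀ x ∈ ps, pvGood P u0 r0 x) →
      (∀ x u r, pvReachN P k u0 r0 u r → x = pvEnc u r → x ∈ ps) →
      P.length + 1 ≤ k + fuel →
      ∀ x, x ∈ pvLoopA P fuel ps ↔ pvGood P u0 r0 x := by
  intro fuel
  induction fuel with
  | zero =>
    intro k ps hInv hProg hfuel x
    rw [pvLoopA]
    constructor
    · exact hInv x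
    · rintro ⟨u, r, hre, rfl⟩
      exact hProg _ u r (pvReachN_mono (pvReach_toN hre) k (by omega)) rfl
  | succ fuel ih =>
    intro k ps hInv hProg hfuel x
    rw [pvLoopA]
    by_cases hss : PySem.Set.issubset (pvRound P ps) ps = true
    · rw [if_pos hss]
      have hsub := (PySem.Set.issubset_iff _ _).mp hss
      rw [PySem.Set.mem_update]
      constructor
      · rintro (h | h)
        · exact hInv x h
        · exact hInv x (hsub x h)
      · rintro ⟨u, r, hre, rfl⟩
        refine Or.inl (pv_closed P ps hsub hre ?_ hu0 hr0)
        exact hProg _ u0 r0 (pvReachN.refl k u0 r0) rfl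
    · rw [if_neg hss]
      apply ih (k+1)
      · intro x hx
        rw [PySem.Set.mem_update] at hx
        rcases hx with h | h
        · exact hInv x h
        · exact pv_round_sound P u0 r0 hu0 hr0 ps hInv x h
      · intro x u r hN hx
        rw [PySem.Set.mem_update]
        cases hN with
        | refl => exact Or.inl (hProg _ u0 r0 (pvReachN.refl k u0 r0) hx)
        | snoc q h hq hnq hsq =>
          rename_i n u'' root''
          have hmem := hProg _ u'' root'' h rfl
          have hsf := pvReach_slashFree (pvReachN_toReach h) hu0 hr0
          exact Or.inr (hx ▸ pvRound_mem_enc P ps u'' root'' hsf.1 hsf.2 hmem q hq hnq hsq)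
      · omega

theorem pvGoLoop_mem (root : String) (avail : List String)
    (todo : List {p : String // p ∈ avail}) (res : PySem.Set String) (y : String) :
    y ∈ pvGoLoop root avail todo res ↔
      y ∈ res ∨ ∃ p ∈ todo, PySem.Str.startswith root p.1 = true ∧
        y ∈ pvGo (pvCut root p.1) (avail.erase p.1) := by
  induction todo generalizing res with
  | nil => rw [pvGoLoop]; simp
  | cons p rest ih =>
    rw [pvGoLoop]
    rw [ih]
    by_cases hs : PySem.Str.startswith root p.1 = true
    · rw [if_pos hs, PySem.Set.mem_update]
      constructor
      · rintro ((h | h) | ⟨q, hq, h1, h2⟩)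
        · exact Or.inl h
        · exact Or.inr ⟨p, by simp, hs, h⟩
        · exact Or.inr ⟨q, by simp [hq], h1, h2⟩
      · rintro (h | ⟨q, hq, h1, h2⟩)
        · exact Or.inl (Or.inl h)
        · rcases List.mem_cons.mp hq with rfl | hq
          · exact Or.inl (Or.inr h2)
          · exact Or.inr ⟨q, hq, h1, h2⟩
    · rw [if_neg hs]
      constructor
      · rintro (h | ⟨q, hq, h1, h2⟩)
        · exact Or.inl h
        · exact Or.inr ⟨q, by simp [hq], h1, h2⟩
      · rintro (h | ⟨q, hq, h1, h2⟩)
        · exact Or.inl h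
        · rcases List.mem_cons.mp hq with rfl | hq
          · exact absurd h1 hs
          · exact Or.inr ⟨q, hq, h1, h2⟩

theorem pvGo_mem_aux : ∀ (n : Nat) (avail : List String), avail.length = n →
    ∀ (root y : String), y ∈ pvGo root avail ↔ pvRA root avail y := by
  intro n
  induction n using Nat.strong_induction_on with
  | _ n ih =>
    intro avail hlen root y
    rw [pvGo, pvGoLoop_mem]
    have hbase : y ∈ PySem.Set.ofList [root] ↔ y = root := by
      rw [PySem.Set.mem_ofList]; simp
    rw [hbase]
    constructor
    · rintro (rfl | ⟨p, _, h1, h2⟩)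
      · exact pvRA.refl _ avail
      · have hlt : (avail.erase p.1).length < n := by
          have := List.length_erase_of_mem p.2
          have := List.length_pos_of_mem p.2
          omega
        exact pvRA.step p.1 p.2 h1 ((ih _ hlt _ rfl _ _).mp h2)
    · intro h
      cases h with
      | refl => exact Or.inl rfl
      | step p hp hs h =>
        have hlt : (avail.erase p).length < n := by
          have := List.length_erase_of_mem hp
          have := List.length_pos_of_mem hp
          omega
        exact Or.inr ⟨⟨p, hp⟩, List.mem_attach _ _, hs, (ih _ hlt _ rfl _ _).mpr h⟩

theorem pvGo_mem (avail : List String) (root : String) (y : String) :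
    y ∈ pvGo root avail ↔ pvRA root avail y :=
  pvGo_mem_aux avail.length avail rfl root y

theorem pvGoLoop_nodup (root : String) (avail : List String)
    (todo : List {p : String // p ∈ avail}) (res : PySem.Set String)
    (h : res.Nodup) : (pvGoLoop root avail todo res).Nodup := by
  induction todo generalizing res with
  | nil => rw [pvGoLoop]; exact h
  | cons p rest ih =>
    rw [pvGoLoop]
    apply ih
    by_cases hs : PySem.Str.startswith root p.1 = true
    · rw [if_pos hs]; exact PySem.Set.nodup_update _ _ h
    · rw [if_neg hs]; exact h

theorem pvGo_nodup (root : String) (avail : List String) : (pvGo root avail).Nodup := by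
  rw [pvGo]
  exact pvGoLoop_nodup _ _ _ _ (PySem.Set.nodup_ofList _)

theorem pv_filter_erase (P : List String) (used : List String) (p : String) :
    ((PySem.List.dedup P).filter (fun q => decide (q ∉ used))).erase p =
      (PySem.List.dedup P).filter (fun q => decide (q ∉ used ++ [p])) := by
  have hnd : ((PySem.List.dedup P).filter (fun q => decide (q ∉ used))).Nodup := by
    have : (PySem.List.dedup P).Nodup := PySem.Set.nodup_ofList P
    exact this.filter _
  rw [hnd.erase_eq_filter, List.filter_filter]
  apply List.filter_congr
  intro q _
  by_cases h1 : q ∈ used <;> by_cases h2 : q = p <;> simp [h1, h2]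

theorem pvRA_toReach (P : List String) : ∀ {root : String} {avail : List String} {r : String},
    pvRA root avail r → ∀ used, avail = (PySem.List.dedup P).filter (fun q => decide (q ∉ used)) →
    ∃ u', pvReach P used root u' r := by
  intro root avail r h
  induction h with
  | refl root avail => exact fun used _ => ⟨used, pvReach.refl used root⟩
  | step p hp hs h ih =>
    intro used heq
    subst heq
    have hmem := List.mem_filter.mp hp
    have hP : p ∈ P := (PySem.Set.mem_ofList P p).mp hmem.1
    have hnu : p ∉ used := by simpa using hmem.2
    obtain ⟨u', hre⟩ := ih (used ++ [p]) (pv_filter_erase P used p)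
    exact ⟨u', pvReach.step p hP hnu hs hre⟩

theorem pvReach_toRA (P : List String) : ∀ {used : List String} {root : String}
    {u' : List String} {r : String}, pvReach P used root u' r →
    pvRA root ((PySem.List.dedup P).filter (fun q => decide (q ∉ used))) r := by
  intro used root u' r h
  induction h with
  | refl u r => exact pvRA.refl r _
  | step p hp hn hs h ih =>
    refine pvRA.step p ?_ hs ?_
    · rw [List.mem_filter]
      exact ⟨(PySem.Set.mem_ofList P p).mpr hp, by simpa using hn⟩
    · rw [pv_filter_erase P _ p]
      exact ih

theorem pvRA_iff_reach (P : List String) : ∀ (used : List String) (root r : String),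
    pvRA root ((PySem.List.dedup P).filter (fun q => decide (q ∉ used))) r ↔
      ∃ u', pvReach P used root u' r := by
  intro used root r
  constructor
  · intro h; exact pvRA_toReach P h used rfl
  · rintro ⟨u', h⟩; exact pvReach_toRA P h
-- ---------- assembling the verdict ----------
theorem pv_main (word : String) (prefixes : List String) :
    cut_possible_prefixes word prefixes = cut_possible_prefixes_alt word prefixes := by
  rw [cut_possible_prefixes, cut_possible_prefixes_alt]
  have hsegs : pvSplit word ≠ [] := pvSplit_ne_nil word
  set segs := pvSplit word with hsegs_def
  have hdec : segs = segs.dropLast ++ [segs.getLast hsegs] := (List.dropLast_append_getLast hsegs).symm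
  have hroot0 : pvLast segs = segs.getLast hsegs := by
    conv_lhs => rw [hdec]
    rw [pvLast_append]
  have hused0 : PySem.List.slice segs none (some (-1)) = segs.dropLast := pv_slice_neg_one segs
  set u0 := segs.dropLast with hu0_def
  set r0 := segs.getLast hsegs with hr0_def
  have hu0sf : ∀ x ∈ u0, pvSlashFree x := fun x hx =>
    pvSplit_slashFree word x (List.dropLast_subset _ hx)
  have hr0sf : pvSlashFree r0 := pvSplit_slashFree word _ (List.getLast_mem hsegs)
  have hword : word = pvEnc u0 r0 := by
    rw [pvEnc, ← hdec, hsegs_def, pv_join_split]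
  -- A's loop computes exactly the encodings of the reachable states
  have hloop : ∀ x, x ∈ pvLoopA prefixes (prefixes.length + 2) (PySem.Set.ofList [word]) ↔
      pvGood prefixes u0 r0 x := by
    apply pv_loop_main prefixes u0 r0 hu0sf hr0sf (prefixes.length + 2) 0
    · intro x hx
      rw [PySem.Set.mem_ofList] at hx
      simp at hx
      exact ⟨u0, r0, pvReach.refl u0 r0, by rw [hx, hword]⟩
    · intro x u r hN hx
      cases hN with
      | refl =>
        rw [PySem.Set.mem_ofList]
        simp [hx, hword]
    · omega
  rw [hroot0, hused0]
  apply (PySem.List.sorted_id_eq_sorted_id_iff_perm _ _).mpr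
  apply (List.perm_ext_iff_of_nodup (PySem.Set.nodup_ofList _) (pvGo_nodup _ _)).mpr
  intro r
  rw [PySem.Set.mem_ofList, pvGo_mem]
  rw [pvRA_iff_reach prefixes u0 r0 r]
  constructor
  · intro hr
    obtain ⟨x, hx, rfl⟩ := List.mem_map.mp hr
    obtain ⟨u, rr, hre, rfl⟩ := (hloop x).mp hx
    obtain ⟨husf, hrsf⟩ := pvReach_slashFree hre hu0sf hr0sf
    rw [pv_split_enc u rr husf hrsf, pvLast_append]
    exact ⟨u, hre⟩
  · rintro ⟨u', hre⟩
    apply List.mem_map.mpr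
    refine ⟨pvEnc u' r, (hloop _).mpr ⟨u', r, hre, rfl⟩, ?_⟩
    obtain ⟨husf, hrsf⟩ := pvReach_slashFree hre hu0sf hr0sf
    rw [pv_split_enc u' r husf hrsf, pvLast_append]

-- ===== VERDICT (by name: the statement is the Claim_ definition above) =====
theorem cut_possible_prefixes_spec : Claim_equal_cut_possible_prefixes := by
  intro word prefixes _
  unfold Spec_cut_possible_prefixes
  exact pv_main word prefixes
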